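-- pv_equiv track=rewrite | github.com/Jayesh12356/FS_Intelligence_Platform | backend/app/orchestration/pipeline_llm.py | _extract_first_json_blob
-- ===== SOURCE A (Python) =====
-- def _extract_first_json_blob(text: str) -> str | None:
--     """Find the first balanced {...} or [...] blob in text, if any."""
--     stripped = text.strip()
--     start_chars = "[{"
--     end_for = {"{": "}", "[": "]"}
--     for i, ch in enumerate(stripped):
--         if ch in start_chars:
--             depth = 0
--             end = end_for[ch]
--             in_str = False
--             esc = False
--             for j in range(i, len(stripped)):
--                 c = stripped[j]
--                 if esc:
--                     esc = False
--                     continue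
--                 if c == "\\":
--                     esc = True
--                     continue
--                 if c == '"':
--                     in_str = not in_str
--                     continue
--                 if in_str:
--                     continue
--                 if c == ch:
--                     depth += 1
--                 elif c == end:
--                     depth -= 1
--                     if depth == 0:
--                         return stripped[i:j + 1]
--             break
--     return None
-- ===== SOURCE B (Python) =====
-- def _extract_first_json_blob(text: str) -> str | None:
--     """Find the first balanced {...} or [...] blob in text, if any."""
--     s = text.strip()
--     cands = [(k, c) for k, c in enumerate(s) if c in "[{"]
--     if not cands:
--         return None
--     i, open_c = cands[0]
--     close_c = "}" if open_c == "{" else "]"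
--     depth = 0
--     for off, c in _bracket_tokens(s[i:], i):
--         if c == open_c:
--             depth += 1
--         elif c == close_c:
--             depth -= 1
--             if depth == 0:
--                 return s[i:off + 1]
--     return None
--
--
-- def _bracket_tokens(t: str, start: int) -> list[tuple[int, str]]:
--     """Positions (offset by start) of the brackets of t lying outside string literals."""
--     toks = []
--     in_str = False
--     esc = False
--     for k, c in enumerate(t, start):
--         if esc:
--             esc = False
--         elif c == "\\":
--             esc = True
--         elif c == '"':
--             in_str = not in_str
--         elif not in_str and c in "{}[]":
--             toks.append((k, c))
--     return toks
-- ===== Notes on version B (the rewrite author's own statement) =====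
-- stated objective: alternative
-- what changed: Replaces A's single fused per-character state machine with a staged pipeline: one pass tokenizes the text into an explicit list of (index, bracket) pairs lying outside string literals, and a separate second pass scans that token list with only a depth counter; the first opening bracket is picked by a comprehension instead of an outer for/break loop.
import Mathlib
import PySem

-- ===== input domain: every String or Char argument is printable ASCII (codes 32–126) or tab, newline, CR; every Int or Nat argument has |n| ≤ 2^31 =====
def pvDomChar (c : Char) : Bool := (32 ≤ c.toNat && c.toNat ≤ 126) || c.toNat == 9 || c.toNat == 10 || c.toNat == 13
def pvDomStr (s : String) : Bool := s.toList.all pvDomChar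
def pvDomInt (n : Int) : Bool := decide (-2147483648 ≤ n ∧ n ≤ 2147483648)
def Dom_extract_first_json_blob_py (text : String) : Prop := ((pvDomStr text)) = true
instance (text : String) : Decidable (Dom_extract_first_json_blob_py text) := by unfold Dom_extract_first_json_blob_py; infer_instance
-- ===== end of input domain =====

-- B replaces A's fused per-character bracket/string/escape state machine by a staged pipeline:
-- first tokenize the brackets lying outside string literals into an explicit list, then scan
-- that token list with only a depth counter; objective: alternative decomposition.

-- ===== PORT A =====
-- inner 'for j in range(i, len(stripped))' loop of A, transcribed as recursion over the
-- suffix with the running index j and the state (depth, in_str, esc)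
def pvLoopA (ch endc : Char) : List Char → Int → Int → Bool → Bool → Option Int
  | [], _, _, _, _ => none
  | c :: rest, j, depth, instr, esc =>
    if esc then pvLoopA ch endc rest (j + 1) depth instr false
    else if c = '\\' then pvLoopA ch endc rest (j + 1) depth instr true
    else if c = '"' then pvLoopA ch endc rest (j + 1) depth (!instr) false
    else if instr then pvLoopA ch endc rest (j + 1) depth instr false
    else if c = ch then pvLoopA ch endc rest (j + 1) (depth + 1) instr false
    else if c = endc then
      if depth - 1 = 0 then some j else pvLoopA ch endc rest (j + 1) (depth - 1) instr false
    else pvLoopA ch endc rest (j + 1) depth instr false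

-- outer 'for i, ch in enumerate(stripped): if ch in "[{": … break' — only the first
-- opening bracket is ever tried (the loop breaks after it)
def pvFindA : List Char → Int → Option (Int × Char)
  | [], _ => none
  | c :: rest, i => if c = '[' ∨ c = '{' then some (i, c) else pvFindA rest (i + 1)

def extract_first_json_blob_py (text : String) : Option String :=
  let stripped := PySem.Chars.strip text.toList
  match pvFindA stripped 0 with
  | none => none
  | some (i, ch) =>
    let endc := PySem.Dict.getD (PySem.Dict.ofList [('{', '}'), ('[', ']')]) ch ' '
    match pvLoopA ch endc (stripped.drop i.toNat) i 0 false false with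
    | none => none
    | some j => some (String.ofList (PySem.List.slice stripped (some i) (some (j + 1))))

-- ===== PORT B =====
-- B's helper _bracket_tokens: one pass collecting (index, char) for every bracket
-- outside a string literal ('enumerate(t, start)' carries the absolute index)
def pvTokensB : List Char → Int → Bool → Bool → List (Int × Char)
  | [], _, _, _ => []
  | c :: rest, k, instr, esc =>
    if esc then pvTokensB rest (k + 1) instr false
    else if c = '\\' then pvTokensB rest (k + 1) instr true
    else if c = '"' then pvTokensB rest (k + 1) (!instr) false
    else if instr = false ∧ (c = '{' ∨ c = '}' ∨ c = '[' ∨ c = ']') then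
      (k, c) :: pvTokensB rest (k + 1) instr false
    else pvTokensB rest (k + 1) instr false

-- B's second stage: the 'for off, c in tokens' depth scan over the token list
def pvScanB (openc closec : Char) : List (Int × Char) → Int → Option Int
  | [], _ => none
  | (off, c) :: rest, depth =>
    if c = openc then pvScanB openc closec rest (depth + 1)
    else if c = closec then
      if depth - 1 = 0 then some off else pvScanB openc closec rest (depth - 1)
    else pvScanB openc closec rest depth

def extract_first_json_blob_py_alt (text : String) : Option String :=
  let s := PySem.Chars.strip text.toList
  match ((PySem.List.enumerate s 0).filter (fun p => p.2 == '[' || p.2 == '{')).head? with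
  | none => none
  | some (i, open_c) =>
    let close_c := if open_c == '{' then '}' else ']'
    match pvScanB open_c close_c (pvTokensB (s.drop i.toNat) i false false) 0 with
    | none => none
    | some off => some (String.ofList (PySem.List.slice s (some i) (some (off + 1))))

-- ===== PRECONDITION & SPEC =====
def Spec_extract_first_json_blob_py (text : String) (out : Option String) : Prop := out = extract_first_json_blob_py_alt text
instance (text : String) (out : Option String) : Decidable (Spec_extract_first_json_blob_py text out) := by unfold Spec_extract_first_json_blob_py; infer_instance

-- ===== CLAIM (what is proved, stated in full; the proofs are below) =====
def Claim_equal_extract_first_json_blob_py : Prop := ∀ (text : String), Dom_extract_first_json_blob_py text → Spec_extract_first_json_blob_py text (extract_first_json_blob_py text)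

-- ===== LEMMAS AND PROOFS =====

-- A's enumerate-and-break search equals the head of B's filtered enumeration
lemma pvFind_eq (l : List Char) (n : Int) :
    pvFindA l n = ((PySem.List.enumerate l n).filter (fun p => p.2 == '[' || p.2 == '{')).head? := by
  induction l generalizing n with
  | nil => simp [pvFindA, PySem.List.enumerate_nil]
  | cons c rest ih =>
    rw [PySem.List.enumerate_cons]
    by_cases h : c = '[' ∨ c = '{'
    · have hb : (c == '[' || c == '{') = true := by
        rcases h with h | h <;> simp [h]
      simp [pvFindA, h, List.filter, hb]
    · have hb : (c == '[' || c == '{') = false := by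
        rcases not_or.mp h with ⟨h1, h2⟩; simp [h1, h2]
      simp [pvFindA, h, List.filter, hb, ih]

lemma pvFindA_char : ∀ (l : List Char) (n i : Int) (ch : Char),
    pvFindA l n = some (i, ch) → ch = '[' ∨ ch = '{' := by
  intro l
  induction l with
  | nil => intro n i ch h; simp [pvFindA] at h
  | cons c rest ih =>
    intro n i ch h
    rw [pvFindA] at h
    by_cases hc : c = '[' ∨ c = '{'
    · rw [if_pos hc] at h
      cases h
      exact hc
    · rw [if_neg hc] at h
      exact ih _ _ _ h

-- the simulation: A's fused scan equals B's tokenize-then-depth-scan pipeline, for any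
-- matching bracket pair (so in particular for '['/']' and '{'/'}')
lemma pvSimTok (ch endc : Char)
    (hpair : (ch = '[' ∧ endc = ']') ∨ (ch = '{' ∧ endc = '}')) :
    ∀ (l : List Char) (j depth : Int) (instr esc : Bool),
      pvLoopA ch endc l j depth instr esc
        = pvScanB ch endc (pvTokensB l j instr esc) depth := by
  have hchbr : ch = '{' ∨ ch = '}' ∨ ch = '[' ∨ ch = ']' := by
    rcases hpair with ⟨h, _⟩ | ⟨h, _⟩ <;> subst h <;> tauto
  have hendbr : endc = '{' ∨ endc = '}' ∨ endc = '[' ∨ endc = ']' := by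
    rcases hpair with ⟨_, h⟩ | ⟨_, h⟩ <;> subst h <;> tauto
  have hne : ch ≠ endc := by
    rcases hpair with ⟨h1, h2⟩ | ⟨h1, h2⟩ <;> subst h1 <;> subst h2 <;> decide
  intro l
  induction l with
  | nil => intro j depth instr esc; simp [pvLoopA, pvTokensB, pvScanB]
  | cons c rest ih =>
    intro j depth instr esc
    rw [pvLoopA, pvTokensB]
    by_cases he : esc = true
    · subst he; simp only [if_true]; exact ih (j + 1) depth instr false
    · have he' : esc = false := by cases esc <;> simp_all
      subst he'
      simp only [Bool.false_eq_true, if_false]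
      by_cases h1 : c = '\\'
      · rw [if_pos h1, if_pos h1]; exact ih (j + 1) depth instr true
      · rw [if_neg h1, if_neg h1]
        by_cases h2 : c = '"'
        · rw [if_pos h2, if_pos h2]; exact ih (j + 1) depth (!instr) false
        · rw [if_neg h2, if_neg h2]
          by_cases h3 : instr = true
          · subst h3
            rw [if_pos rfl]
            rw [if_neg (by simp : ¬ ((true : Bool) = false ∧ (c = '{' ∨ c = '}' ∨ c = '[' ∨ c = ']')))]
            exact ih (j + 1) depth true false
          · have h3' : instr = false := by cases instr <;> simp_all
            subst h3'
            simp only [Bool.false_eq_true, if_false]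
            by_cases h4 : c = ch
            · subst h4
              rw [if_pos rfl, if_pos ⟨trivial, hchbr⟩, pvScanB, if_pos rfl]
              exact ih (j + 1) (depth + 1) false false
            · rw [if_neg h4]
              by_cases h5 : c = endc
              · subst h5
                rw [if_pos rfl, if_pos (show True ∧ (c = '{' ∨ c = '}' ∨ c = '[' ∨ c = ']') from ⟨trivial, hendbr⟩), pvScanB, if_neg (Ne.symm hne), if_pos rfl]
                by_cases h6 : depth - 1 = 0
                · rw [if_pos h6, if_pos h6]
                · rw [if_neg h6, if_neg h6]; exact ih (j + 1) (depth - 1) false false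
              · rw [if_neg h5]
                by_cases h7 : c = '{' ∨ c = '}' ∨ c = '[' ∨ c = ']'
                · rw [if_pos ⟨trivial, h7⟩, pvScanB, if_neg h4, if_neg h5]
                  exact ih (j + 1) depth false false
                · rw [if_neg (by tauto : ¬ (True ∧ (c = '{' ∨ c = '}' ∨ c = '[' ∨ c = ']')))]
                  exact ih (j + 1) depth false false

-- ===== VERDICT (by name: the statement is the Claim_ definition above) =====
theorem extract_first_json_blob_py_spec : Claim_equal_extract_first_json_blob_py := by
  intro text _
  unfold Spec_extract_first_json_blob_py
  simp only [extract_first_json_blob_py, extract_first_json_blob_py_alt, ← pvFind_eq]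
  cases hf : pvFindA (PySem.Chars.strip text.toList) 0 with
  | none => rfl
  | some p =>
    obtain ⟨i, ch⟩ := p
    rcases pvFindA_char _ _ _ _ hf with h | h <;> subst h <;> dsimp only
    · have he : (PySem.Dict.ofList [('{', '}'), ('[', ']')]).getD '[' ' ' = ']' := by decide
      have hc : (if (('[' : Char) == '{') = true then '}' else ']') = ']' := by decide
      rw [he, hc, pvSimTok '[' ']' (Or.inl ⟨rfl, rfl⟩)]
    · have he : (PySem.Dict.ofList [('{', '}'), ('[', ']')]).getD '{' ' ' = '}' := by decide
      have hc : (if (('{' : Char) == '{') = true then '}' else ']') = '}' := by decide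
      rw [he, hc, pvSimTok '{' '}' (Or.inr ⟨rfl, rfl⟩)]
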